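-- pv_equiv track=rewrite | github.com/RichardGeh/KAI-Kognitive_Artifical_Intelligence | component_9_logik_engine_advanced.py | _are_properties_exclusive
-- ===== SOURCE A (Python) =====
-- def _are_properties_exclusive(prop1: str, prop2: str) -> bool:
--     """
--     Prüft ob zwei Eigenschaften exklusiv sind.
--
--     Nutzt Domänenwissen über exklusive Kategorien.
--     """
--     prop1_lower = prop1.lower()
--     prop2_lower = prop2.lower()
--
--     # Identische Eigenschaften sind NICHT exklusiv
--     if prop1_lower == prop2_lower:
--         return False
--
--     # Bekannte exklusive Kategorien
--     exclusive_sets = [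
--         # Farben
--         {
--             "rot",
--             "grün",
--             "blau",
--             "gelb",
--             "schwarz",
--             "weiß",
--             "orange",
--             "lila",
--             "rosa",
--             "braun",
--         },
--         # Größen
--         {"groß", "klein", "mittel", "riesig", "winzig"},
--         # Temperaturen
--         {"heiß", "kalt", "warm", "kühl", "eiskalt", "glühend"},
--         # Zustände
--         {"lebendig", "tot"},
--         {"an", "aus"},
--         {"offen", "geschlossen"},
--         # Geschmack
--         {"süß", "sauer", "bitter", "salzig", "umami"},
--     ]
--
--     # Prüfe ob beide in derselben exklusiven Menge sind
--     for exclusive_set in exclusive_sets: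
--         if prop1_lower in exclusive_set and prop2_lower in exclusive_set:
--             return True
--
--     # Prüfe ob eines das Negat des anderen ist (antonyms)
--     antonym_pairs = [
--         ("groß", "klein"),
--         ("heiß", "kalt"),
--         ("schnell", "langsam"),
--         ("leicht", "schwer"),
--         ("hell", "dunkel"),
--         ("gut", "schlecht"),
--     ]
--
--     for ant1, ant2 in antonym_pairs:
--         if (prop1_lower == ant1 and prop2_lower == ant2) or (
--             prop1_lower == ant2 and prop2_lower == ant1
--         ):
--             return True
--
--     return False
-- ===== SOURCE B (Python) =====
-- _GROUPS = [
--     ["rot", "grün", "blau", "gelb", "schwarz", "weiß", "orange", "lila", "rosa", "braun"],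
--     ["groß", "klein", "mittel", "riesig", "winzig"],
--     ["heiß", "kalt", "warm", "kühl", "eiskalt", "glühend"],
--     ["lebendig", "tot"],
--     ["an", "aus"],
--     ["offen", "geschlossen"],
--     ["süß", "sauer", "bitter", "salzig", "umami"],
--     # antonym pairs folded in as two-element groups (redundant ones are
--     # absorbed by setdefault, since they lie inside an existing group)
--     ["groß", "klein"],
--     ["heiß", "kalt"],
--     ["schnell", "langsam"],
--     ["leicht", "schwer"],
--     ["hell", "dunkel"],
--     ["gut", "schlecht"],
-- ]
--
-- _GROUP_ID = {}
-- for _i, _g in enumerate(_GROUPS):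
--     for _w in _g:
--         _GROUP_ID.setdefault(_w, _i)
--
--
-- def _are_properties_exclusive(prop1: str, prop2: str) -> bool:
--     p1 = prop1.lower()
--     p2 = prop2.lower()
--     if p1 == p2:
--         return False
--     g1 = _GROUP_ID.get(p1)
--     return g1 is not None and g1 == _GROUP_ID.get(p2)
-- ===== Notes on version B (the rewrite author's own statement) =====
-- stated objective: idiomatic
-- what changed: Replaces A's two sequential scans (over every exclusive set, then over every antonym pair) with a word-to-group-id dict built once at module load (antonym pairs folded in as two-element groups via setdefault), so the call is an equality check plus two table lookups.
import Mathlib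
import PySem

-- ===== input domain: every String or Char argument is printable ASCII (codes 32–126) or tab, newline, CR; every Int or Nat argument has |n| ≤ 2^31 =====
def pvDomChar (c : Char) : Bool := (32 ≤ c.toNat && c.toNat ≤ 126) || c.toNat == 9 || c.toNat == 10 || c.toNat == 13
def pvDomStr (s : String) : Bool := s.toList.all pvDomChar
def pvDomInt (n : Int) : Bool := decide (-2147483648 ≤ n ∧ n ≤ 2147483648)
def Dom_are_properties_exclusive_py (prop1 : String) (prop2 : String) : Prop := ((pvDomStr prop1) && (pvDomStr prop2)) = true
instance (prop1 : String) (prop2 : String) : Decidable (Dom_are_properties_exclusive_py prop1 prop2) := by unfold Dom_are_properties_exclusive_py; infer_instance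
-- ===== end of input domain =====

-- B replaces A's two scans (exclusive sets, then antonym pairs) by one precomputed
-- word -> group-id table and a single pair of lookups (objective: idiomatic/alternative).


-- ===== PORT A =====
def pvExclusiveSets : List (PySem.Set String) :=
  [PySem.Set.ofList ["rot", "grün", "blau", "gelb", "schwarz", "weiß", "orange", "lila", "rosa", "braun"],
   PySem.Set.ofList ["groß", "klein", "mittel", "riesig", "winzig"],
   PySem.Set.ofList ["heiß", "kalt", "warm", "kühl", "eiskalt", "glühend"],
   PySem.Set.ofList ["lebendig", "tot"],
   PySem.Set.ofList ["an", "aus"],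
   PySem.Set.ofList ["offen", "geschlossen"],
   PySem.Set.ofList ["süß", "sauer", "bitter", "salzig", "umami"]]

def pvAntonymPairs : List (String × String) :=
  [("groß", "klein"), ("heiß", "kalt"), ("schnell", "langsam"),
   ("leicht", "schwer"), ("hell", "dunkel"), ("gut", "schlecht")]

-- the body of A after the two lowerings
def pvCoreA (l1 l2 : String) : Bool :=
  if l1 = l2 then false
  else if pvExclusiveSets.any (fun s => PySem.Set.contains s l1 && PySem.Set.contains s l2) then true
  else if pvAntonymPairs.any (fun p => (l1 == p.1 && l2 == p.2) || (l1 == p.2 && l2 == p.1)) then true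
  else false

def are_properties_exclusive_py (prop1 : String) (prop2 : String) : Bool :=
  pvCoreA (PySem.Str.lower prop1) (PySem.Str.lower prop2)

-- ===== PORT B =====
def pvGroups : List (List String) :=
  [["rot", "grün", "blau", "gelb", "schwarz", "weiß", "orange", "lila", "rosa", "braun"],
   ["groß", "klein", "mittel", "riesig", "winzig"],
   ["heiß", "kalt", "warm", "kühl", "eiskalt", "glühend"],
   ["lebendig", "tot"],
   ["an", "aus"],
   ["offen", "geschlossen"],
   ["süß", "sauer", "bitter", "salzig", "umami"],
   ["groß", "klein"],
   ["heiß", "kalt"],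
   ["schnell", "langsam"],
   ["leicht", "schwer"],
   ["hell", "dunkel"],
   ["gut", "schlecht"]]

-- the module-level table build: for i, g in enumerate(_GROUPS): for w in g: setdefault(w, i)
def pvGroupId : PySem.Dict String Int :=
  (PySem.List.enumerate pvGroups).foldl
    (fun d ig => ig.2.foldl (fun d w => d.setdefault w ig.1) d) PySem.Dict.empty

-- the body of B after the two lowerings
def pvCoreB (p1 p2 : String) : Bool :=
  if p1 = p2 then false
  else
    match pvGroupId.get? p1 with
    | none => false
    | some g1 =>
      match pvGroupId.get? p2 with
      | none => false
      | some g2 => g1 == g2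

def are_properties_exclusive_py_alt (prop1 : String) (prop2 : String) : Bool :=
  pvCoreB (PySem.Str.lower prop1) (PySem.Str.lower prop2)

-- ===== PRECONDITION & SPEC =====
def Spec_are_properties_exclusive_py (prop1 : String) (prop2 : String) (out : Bool) : Prop := out = are_properties_exclusive_py_alt prop1 prop2
instance (prop1 : String) (prop2 : String) (out : Bool) : Decidable (Spec_are_properties_exclusive_py prop1 prop2 out) := by unfold Spec_are_properties_exclusive_py; infer_instance

-- ===== CLAIM (what is proved, stated in full; the proofs are below) =====
def Claim_equal_are_properties_exclusive_py : Prop := ∀ (prop1 : String) (prop2 : String), Dom_are_properties_exclusive_py prop1 prop2 → Spec_are_properties_exclusive_py prop1 prop2 (are_properties_exclusive_py prop1 prop2)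

-- ===== LEMMAS AND PROOFS =====
-- all words occurring anywhere in either program
def pvW : List String := pvGroups.flatten

set_option maxRecDepth 100000 in
lemma pv_pairs : ∀ s ∈ pvW, ∀ t ∈ pvW, pvCoreA s t = pvCoreB s t := by decide

def pvGroupIdLit : PySem.Dict String Int := PySem.Dict.mk
  [("rot", 0), ("grün", 0), ("blau", 0), ("gelb", 0), ("schwarz", 0), ("weiß", 0),
   ("orange", 0), ("lila", 0), ("rosa", 0), ("braun", 0),
   ("groß", 1), ("klein", 1), ("mittel", 1), ("riesig", 1), ("winzig", 1),
   ("heiß", 2), ("kalt", 2), ("warm", 2), ("kühl", 2), ("eiskalt", 2), ("glühend", 2),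
   ("lebendig", 3), ("tot", 3), ("an", 4), ("aus", 4), ("offen", 5), ("geschlossen", 5),
   ("süß", 6), ("sauer", 6), ("bitter", 6), ("salzig", 6), ("umami", 6),
   ("schnell", 9), ("langsam", 9), ("leicht", 10), ("schwer", 10),
   ("hell", 11), ("dunkel", 11), ("gut", 12), ("schlecht", 12)]

set_option maxRecDepth 100000 in
lemma pv_gid_lit : pvGroupId = pvGroupIdLit := by decide

lemma pv_gid_none {s : String} (h : s ∉ pvW) : pvGroupId.get? s = none := by
  rw [pv_gid_lit, PySem.Dict.get?_eq_none_iff_not_mem_keys]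
  simp [pvW, pvGroups] at h
  simp [pvGroupIdLit, PySem.Dict.keys]
  tauto

lemma pv_B_none_left {s : String} (h : s ∉ pvW) (t : String) : pvCoreB s t = false := by
  simp [pvCoreB, pv_gid_none h]

lemma pv_B_none_right (s : String) {t : String} (h : t ∉ pvW) : pvCoreB s t = false := by
  unfold pvCoreB
  rw [pv_gid_none h]
  cases pvGroupId.get? s <;> simp

lemma pv_A_none_left {s : String} (h : s ∉ pvW) (t : String) : pvCoreA s t = false := by
  simp [pvW, pvGroups] at h
  simp [pvCoreA, pvExclusiveSets, pvAntonymPairs, PySem.Set.contains, PySem.Set.ofList,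
        PySem.Set.add, h]

lemma pv_A_none_right (s : String) {t : String} (h : t ∉ pvW) : pvCoreA s t = false := by
  simp [pvW, pvGroups] at h
  simp [pvCoreA, pvExclusiveSets, pvAntonymPairs, PySem.Set.contains, PySem.Set.ofList,
        PySem.Set.add, h]

lemma pv_core_eq (s t : String) : pvCoreA s t = pvCoreB s t := by
  by_cases h1 : s ∈ pvW
  · by_cases h2 : t ∈ pvW
    · exact pv_pairs s h1 t h2
    · rw [pv_A_none_right s h2, pv_B_none_right s h2]
  · rw [pv_A_none_left h1 t, pv_B_none_left h1 t]

-- ===== VERDICT (by name: the statement is the Claim_ definition above) =====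
theorem are_properties_exclusive_py_spec : Claim_equal_are_properties_exclusive_py := by
  intro p1 p2 _
  unfold Spec_are_properties_exclusive_py are_properties_exclusive_py are_properties_exclusive_py_alt
  exact pv_core_eq _ _
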